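-- pv_equiv track=rewrite | github.com/ch-pat/project-euler | 5.py | cumulative_biggest_factors
-- ===== SOURCE A (Python) =====
-- from collections import Counter
--
-- def factorize(n):
--     factors = []
--     while n > 1:
--         for i in range(2, n + 1):
--             if n % i == 0:
--                 n = n // i
--                 factors.append(i)
--                 break
--     return factors
--
-- def cumulative_biggest_factors(numbers):
--     factor_counts = []
--     for number in numbers:
--         count = Counter(factorize(number))
--         factor_counts += [count]
--     final_count = {}
--     for element in factor_counts:
--         for item, count in element.items():
--             if item not in final_count:
--                 final_count[item] = count
--             elif final_count[item] < element[item]: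
--                 final_count[item] = count
--     result = 1
--     for item, count in final_count.items():
--         result = result * item ** count
--     return result
-- ===== SOURCE B (Python) =====
-- def cumulative_biggest_factors(numbers):
--     # Running-LCM via Euclid's gcd: no factorization, no Counter merging.
--     result = 1
--     for number in numbers:
--         if number > 1:
--             a, b = result, number
--             while b:
--                 a, b = b, a % b
--             result = result * number // a
--     return result
-- ===== Notes on version B (the rewrite author's own statement) =====
-- stated objective: faster
-- what changed: Replaces trial-division prime factorization with per-prime Counter merging and a final power product by a single running LCM maintained with Euclid's gcd (result = result*n//gcd(result,n) for each n > 1).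
import Mathlib
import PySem

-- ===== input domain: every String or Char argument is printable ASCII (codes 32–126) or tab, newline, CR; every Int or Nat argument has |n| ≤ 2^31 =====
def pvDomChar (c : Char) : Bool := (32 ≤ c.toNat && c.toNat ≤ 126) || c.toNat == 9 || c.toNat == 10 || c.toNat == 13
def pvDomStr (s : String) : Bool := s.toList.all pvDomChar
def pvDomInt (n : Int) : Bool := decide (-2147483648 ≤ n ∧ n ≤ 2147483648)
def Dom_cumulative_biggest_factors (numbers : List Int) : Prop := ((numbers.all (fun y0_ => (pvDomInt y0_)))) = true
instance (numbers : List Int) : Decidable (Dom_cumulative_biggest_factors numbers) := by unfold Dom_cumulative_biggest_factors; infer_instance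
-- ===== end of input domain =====

-- B replaces A's trial-division factorization + Counter max-merging + power product by one
-- running LCM maintained with Euclid's gcd; equal return value on every input.

-- ===== PORT A =====
-- Port of A's `factorize`.  The inner `for i in range(2, n + 1): if n % i == 0: … break`
-- is ported as the lazy scan `findDiv n 2` (Python's range object is lazy too — the list
-- is never materialised); it returns the FIRST i in 2..n with n % i == 0, or none.
def findDiv (n i : Int) : Option Int :=
  if _h : i < n + 1 then
    if PySem.Int.mod n i == 0 then some i else findDiv n (i + 1)
  else none
termination_by (n + 1 - i).toNat

-- facts about a successful scan, cited in factorize's decreasing_by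
theorem findDiv_some (n i j : Int) (h : findDiv n i = some j) :
    i ≤ j ∧ j < n + 1 ∧ PySem.Int.mod n j = 0 := by
  rw [findDiv] at h
  by_cases hlt : i < n + 1
  · rw [dif_pos hlt] at h
    by_cases hmod : PySem.Int.mod n i == 0
    · rw [if_pos hmod] at h
      cases h
      exact ⟨le_refl _, hlt, by simpa using hmod⟩
    · rw [if_neg hmod] at h
      have := findDiv_some n (i + 1) j h
      exact ⟨by omega, this.2⟩
  · rw [dif_neg hlt] at h
    cases h
termination_by (n + 1 - i).toNat

-- while n > 1: divide out the first divisor found, append it.  The `none` branch is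
-- unreachable for 1 < n (i = n always divides n; it is where Python's while loop would
-- otherwise spin forever).
def factorize (n : Int) : List Int :=
  if h : 1 < n then
    match hf : findDiv n 2 with
    | some i => i :: factorize (PySem.Int.floordiv n i)
    | none => []
  else []
termination_by n.toNat
decreasing_by
  obtain ⟨h2i, hin, hmod⟩ := findDiv_some n 2 i hf
  have hdvd : i ∣ n := (PySem.Int.mod_eq_zero_iff_dvd n i).mp hmod
  have hi : 0 < i := by omega
  rw [PySem.Int.floordiv_eq_ediv_of_pos hi]
  have h1 : n / i < n := by
    rw [Int.ediv_lt_iff_lt_mul hi]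
    nlinarith
  have h2 : 0 ≤ n / i := Int.ediv_nonneg (by omega) (by omega)
  omega

def cumulative_biggest_factors (numbers : List Int) : Int :=
  -- factor_counts = []; for number in numbers: factor_counts += [Counter(factorize(number))]
  let factor_counts := numbers.foldl
    (fun acc number => acc ++ [PySem.Dict.counter (factorize number)]) []
  -- final_count = {}; for element in factor_counts: for item, count in element.items(): …
  let final_count := factor_counts.foldl
    (fun fc element =>
      element.items.foldl
        (fun fc ic =>
          if fc.contains ic.1 = false then fc.insert ic.1 ic.2
          -- final_count[item] / element[item]: both keys present here, so getD is exact
          else if fc.getD ic.1 0 < element.getD ic.1 0 then fc.insert ic.1 ic.2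
          else fc)
        fc)
    PySem.Dict.empty
  -- result = 1; for item, count in final_count.items(): result = result * item ** count
  -- (** ported as ^ on toNat: every Counter count here is ≥ 1, where both agree exactly)
  final_count.items.foldl (fun result ic => result * ic.1 ^ ic.2.toNat) 1

-- ===== PORT B =====
-- termination fact for the Euclid loop below (cited in its decreasing_by)
theorem pyMod_natAbs_lt (a b : Int) (hb : b ≠ 0) : (PySem.Int.mod a b).natAbs < b.natAbs := by
  show (Int.fmod a b).natAbs < b.natAbs
  rw [Int.fmod_eq_emod]
  have h0 : 0 ≤ a % b := Int.emod_nonneg a hb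
  rcases lt_or_gt_of_ne hb with hneg | hpos
  · have hlt : a % b < -b := by
      have : a % (-b) < -b := Int.emod_lt_of_pos a (by omega)
      rwa [Int.emod_neg] at this
    by_cases hd : b ∣ a
    · have : a % b = 0 := Int.emod_eq_zero_of_dvd hd
      simp [hd, this]
      omega
    · have hcond : ¬ (0 ≤ b ∨ b ∣ a) := by
        rintro (h' | h')
        · omega
        · exact hd h'
      rw [if_neg hcond]
      omega
  · have hlt : a % b < b := Int.emod_lt_of_pos a hpos
    rw [if_pos (Or.inl (by omega))]
    omega

-- Source B's inner `while b: a, b = b, a % b`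
def pyGcd (a b : Int) : Int :=
  if hb : b = 0 then a else pyGcd b (PySem.Int.mod a b)
termination_by b.natAbs
decreasing_by exact pyMod_natAbs_lt a b hb

def cumulative_biggest_factors_alt (numbers : List Int) : Int :=
  numbers.foldl
    (fun result number =>
      if 1 < number then PySem.Int.floordiv (result * number) (pyGcd result number)
      else result)
    1

-- ===== PRECONDITION & SPEC =====
def Spec_cumulative_biggest_factors (numbers : List Int) (out : Int) : Prop := out = cumulative_biggest_factors_alt numbers
instance (numbers : List Int) (out : Int) : Decidable (Spec_cumulative_biggest_factors numbers out) := by unfold Spec_cumulative_biggest_factors; infer_instance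

-- ===== CLAIM (what is proved, stated in full; the proofs are below) =====
def Claim_equal_cumulative_biggest_factors : Prop := ∀ (numbers : List Int), Dom_cumulative_biggest_factors numbers → Spec_cumulative_biggest_factors numbers (cumulative_biggest_factors numbers)

-- ===== LEMMAS AND PROOFS =====

-- The first i ∈ [k, n+1) dividing m (= n) is m.minFac, for 2 ≤ k ≤ m.minFac.
theorem find_divisor (m : Nat) (hm : 2 ≤ m) (k : Int) (h2 : 2 ≤ k) (hk : k ≤ (m.minFac : Int)) :
    findDiv (m : Int) k = some (m.minFac : Int) := by
  have hle : m.minFac ≤ m := Nat.minFac_le (by omega)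
  have hlt : k < (m : Int) + 1 := by
    have : (m.minFac : Int) ≤ (m : Int) := by exact_mod_cast hle
    omega
  rw [findDiv, dif_pos hlt]
  by_cases hkm : k = (m.minFac : Int)
  · subst hkm
    have hdvd : ((m.minFac : Int)) ∣ (m : Int) := Int.natCast_dvd_natCast.mpr (Nat.minFac_dvd m)
    have hmod : PySem.Int.mod (m : Int) (m.minFac : Int) = 0 :=
      (PySem.Int.mod_eq_zero_iff_dvd _ _).mpr hdvd
    rw [if_pos (by simp [hmod])]
  · have hne : ¬ (PySem.Int.mod (m : Int) k = 0) := by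
      intro h0
      have hdvd : k ∣ (m : Int) := (PySem.Int.mod_eq_zero_iff_dvd _ _).mp h0
      have hk0 : k = (k.toNat : Int) := by omega
      have hdvd' : k.toNat ∣ m := by
        rw [hk0] at hdvd; exact_mod_cast hdvd
      have : m.minFac ≤ k.toNat := Nat.minFac_le_of_dvd (by omega) hdvd'
      omega
    rw [if_neg (by simp [hne])]
    exact find_divisor m hm (k + 1) (by omega) (by omega)
termination_by (m.minFac + 1) - k.toNat
decreasing_by omega

theorem factorize_eq (n : Int) :
    factorize n = (n.toNat.primeFactorsList).map (Nat.cast : Nat → Int) := by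
  by_cases h : 1 < n
  · obtain ⟨m, hm2, rfl⟩ : ∃ m : Nat, 2 ≤ m ∧ n = (m : Int) := ⟨n.toNat, by omega, by omega⟩
    have hmf2 : 2 ≤ m.minFac := (Nat.minFac_prime (by omega : m ≠ 1)).two_le
    have hdiv := find_divisor m hm2 2 (by omega) (by exact_mod_cast hmf2)
    rw [factorize.eq_def, dif_pos h]
    split
    · rename_i i hf
      rw [hdiv] at hf
      cases hf
      have h1 : PySem.Int.floordiv (m : Int) (m.minFac : Int) = ((m / m.minFac : Nat) : Int) := by
        simp
      rw [h1, factorize_eq (((m / m.minFac : Nat) : Int))]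
      simp only [Int.toNat_natCast]
      obtain ⟨k, rfl⟩ : ∃ k, m = k + 2 := ⟨m - 2, by omega⟩
      rw [Nat.primeFactorsList]
      simp
    · rename_i hf
      rw [hdiv] at hf
      simp at hf
  · rw [factorize.eq_def, dif_neg h]
    have : n.toNat = 0 ∨ n.toNat = 1 := by omega
    rcases this with h0 | h1
    · simp [h0]
    · simp [h1]
termination_by n.toNat
decreasing_by
  have hd : m / m.minFac < m := Nat.div_lt_self (by omega) (by omega)
  simp only [Int.toNat_natCast]
  omega

theorem pyGcd_eq (a b : Int) (ha : 0 ≤ a) (hb : 0 ≤ b) : pyGcd a b = (Int.gcd a b : Int) := by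
  rw [pyGcd]
  by_cases h : b = 0
  · subst h
    simp [Int.gcd, Int.natAbs_of_nonneg ha]
  · rw [dif_neg h]
    have hbpos : 0 < b := by omega
    have hmod : PySem.Int.mod a b = a % b := PySem.Int.mod_eq_emod_of_pos hbpos
    have h1 : 0 ≤ a % b := Int.emod_nonneg a h
    have h2 : a % b < b := Int.emod_lt_of_pos a hbpos
    rw [hmod, pyGcd_eq b (a % b) hb h1]
    congr 1
    have ha' : a = (a.toNat : Int) := by omega
    have hb' : b = (b.toNat : Int) := by omega
    rw [ha', hb', ← Int.natCast_mod, Int.gcd_natCast_natCast, Int.gcd_natCast_natCast,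
      Nat.gcd_comm b.toNat, ← Nat.gcd_rec, Nat.gcd_comm]
termination_by b.natAbs
decreasing_by
  have := Int.emod_nonneg a h
  have := Int.emod_lt_of_pos a (by omega : 0 < b)
  omega

-- spec-level running LCM
def lcmFoldN (ns : List Int) (L : Nat) : Nat :=
  ns.foldl (fun l x => if 1 < x then Nat.lcm l x.toNat else l) L

theorem alt_eq_lcmFold (ns : List Int) (L : Nat) (hL : 0 < L) :
    ns.foldl
      (fun result number =>
        if 1 < number then PySem.Int.floordiv (result * number) (pyGcd result number)
        else result)
      (L : Int) = (lcmFoldN ns L : Int) := by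
  induction ns generalizing L with
  | nil => simp [lcmFoldN]
  | cons x xs ih =>
    rw [List.foldl_cons]
    by_cases hx : 1 < x
    · have hx' : x = (x.toNat : Int) := by omega
      have hg : pyGcd (L : Int) x = ((Nat.gcd L x.toNat : Nat) : Int) := by
        rw [pyGcd_eq _ _ (by positivity) (by omega), hx', Int.gcd_natCast_natCast,
          Int.toNat_natCast]
      have hstep : (if 1 < x then PySem.Int.floordiv ((L : Int) * x) (pyGcd (L : Int) x)
          else (L : Int)) = ((Nat.lcm L x.toNat : Nat) : Int) := by
        rw [if_pos hx, hg]
        rw [show ((L : Int) * x) = ((L * x.toNat : Nat) : Int) by rw [hx']; push_cast; simp]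
        rw [PySem.Int.floordiv_natCast]
        rfl
      rw [hstep, ih _ (Nat.pos_of_ne_zero (Nat.lcm_ne_zero (by omega) (by omega)))]
      simp [lcmFoldN, hx]
    · rw [if_neg hx, ih _ hL]
      simp [lcmFoldN, hx]

-- fc represents the prime factorization of L
def GoodDict (fc : PySem.Dict Int Int) (L : Nat) : Prop :=
  fc.keys.Nodup ∧ (∀ k ∈ fc.keys, 0 ≤ k) ∧
  (∀ p : Nat, ((p : Int) ∈ fc.keys ↔ L.factorization p ≠ 0)) ∧
  (∀ p : Nat, fc.getD (p : Int) 0 = (L.factorization p : Int))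

theorem merge_fold (e fc : PySem.Dict Int Int) (l : List (Int × Int))
    (hval : ∀ kv ∈ l, e.getD kv.1 0 = kv.2) (hpos : ∀ kv ∈ l, 0 ≤ kv.2)
    (hnd : fc.keys.Nodup) :
    (l.foldl
        (fun fc ic =>
          if fc.contains ic.1 = false then fc.insert ic.1 ic.2
          else if fc.getD ic.1 0 < e.getD ic.1 0 then fc.insert ic.1 ic.2
          else fc) fc).keys.Nodup ∧
    (∀ k, k ∈ (l.foldl
        (fun fc ic =>
          if fc.contains ic.1 = false then fc.insert ic.1 ic.2
          else if fc.getD ic.1 0 < e.getD ic.1 0 then fc.insert ic.1 ic.2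
          else fc) fc).keys ↔ k ∈ fc.keys ∨ k ∈ l.map Prod.fst) ∧
    (∀ k, (l.foldl
        (fun fc ic =>
          if fc.contains ic.1 = false then fc.insert ic.1 ic.2
          else if fc.getD ic.1 0 < e.getD ic.1 0 then fc.insert ic.1 ic.2
          else fc) fc).getD k 0
      = if k ∈ l.map Prod.fst then max (fc.getD k 0) (e.getD k 0) else fc.getD k 0) := by
  induction l generalizing fc with
  | nil => exact ⟨hnd, by simp, by simp⟩
  | cons kv rest ih =>
    simp only [List.foldl_cons]
    set fc1 := (if fc.contains kv.1 = false then fc.insert kv.1 kv.2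
      else if fc.getD kv.1 0 < e.getD kv.1 0 then fc.insert kv.1 kv.2 else fc) with hfc1
    have hval1 : e.getD kv.1 0 = kv.2 := hval kv (by simp)
    have hpos1 : 0 ≤ kv.2 := hpos kv (by simp)
    have hnd1 : fc1.keys.Nodup := by
      rw [hfc1]; split_ifs with h1 h2
      · exact PySem.Dict.nodup_keys_insert _ _ _ hnd
      · exact PySem.Dict.nodup_keys_insert _ _ _ hnd
      · exact hnd
    have hmem1 : ∀ k, k ∈ fc1.keys ↔ k ∈ fc.keys ∨ k = kv.1 := by
      intro k; rw [hfc1]; split_ifs with h1 h2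
      · rw [PySem.Dict.mem_keys_insert]; tauto
      · rw [PySem.Dict.mem_keys_insert]; tauto

      · have hc : kv.1 ∈ fc.keys :=
          (PySem.Dict.contains_iff_mem_keys fc kv.1).mp (by simpa using h1)
        constructor
        · tauto
        · rintro (hk | rfl)
          · exact hk
          · exact hc
    have hgd1 : ∀ k, fc1.getD k 0
        = if k = kv.1 then max (fc.getD k 0) (e.getD k 0) else fc.getD k 0 := by
      intro k
      by_cases hk : k = kv.1
      · subst hk
        rw [if_pos rfl, hfc1]
        by_cases h1 : fc.contains kv.1 = false
        · rw [if_pos h1, PySem.Dict.getD_insert fc kv.1 kv.1 kv.2 0, if_pos rfl,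
            PySem.Dict.getD_of_not_contains fc 0 h1, hval1]
          omega
        · rw [if_neg h1]
          by_cases h2 : fc.getD kv.1 0 < e.getD kv.1 0
          · rw [hval1] at h2
            rw [if_pos (by rw [hval1]; exact h2),
              PySem.Dict.getD_insert fc kv.1 kv.1 kv.2 0, if_pos rfl, hval1]
            omega
          · rw [hval1] at h2
            rw [if_neg (by rw [hval1]; exact h2), hval1]
            omega
      · rw [if_neg hk, hfc1]
        by_cases h1 : fc.contains kv.1 = false
        · rw [if_pos h1, PySem.Dict.getD_insert fc kv.1 k kv.2 0, if_neg hk]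
        · rw [if_neg h1]
          by_cases h2 : fc.getD kv.1 0 < e.getD kv.1 0
          · rw [if_pos h2, PySem.Dict.getD_insert fc kv.1 k kv.2 0, if_neg hk]
          · rw [if_neg h2]
    obtain ⟨A1, A2, A3⟩ := ih fc1 (fun kv h => hval kv (by simp [h]))
      (fun kv h => hpos kv (by simp [h])) hnd1
    refine ⟨A1, ?_, ?_⟩
    · intro k
      rw [A2 k, hmem1 k]
      simp only [List.map_cons, List.mem_cons]
      tauto
    · intro k
      rw [A3 k, hgd1 k]
      by_cases hk1 : k = kv.1 <;> by_cases hk2 : k ∈ rest.map Prod.fst <;>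
        simp only [hk1, hk2, List.map_cons, List.mem_cons, if_false, if_pos,
          or_true, or_false, true_or] <;>
        omega

theorem merge_counter (fc : PySem.Dict Int Int) (L : Nat) (n : Int)
    (hfc : GoodDict fc L) (hL : L ≠ 0) :
    GoodDict
      ((PySem.Dict.counter (factorize n)).items.foldl
        (fun fc ic =>
          if fc.contains ic.1 = false then fc.insert ic.1 ic.2
          else if fc.getD ic.1 0 < (PySem.Dict.counter (factorize n)).getD ic.1 0 then fc.insert ic.1 ic.2
          else fc) fc)
      (if 1 < n then Nat.lcm L n.toNat else L) := by
  obtain ⟨hnd, hpos, hmem, hval⟩ := hfc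
  by_cases hn : 1 < n
  · obtain ⟨m, hm2, rfl⟩ : ∃ m : Nat, 2 ≤ m ∧ n = (m : Int) := ⟨n.toNat, by omega, by omega⟩
    rw [if_pos hn, Int.toNat_natCast]
    have hxs_eq : factorize (m : Int) = (m.primeFactorsList).map (Nat.cast : Nat → Int) := by
      rw [factorize_eq]
      simp
    have hcnt : ∀ p : Nat,
        (PySem.Dict.counter (factorize (m : Int))).getD (p : Int) 0
          = ((m.factorization p : Nat) : Int) := by
      intro p
      rw [PySem.Dict.getD_counter, hxs_eq,
        List.count_map_of_injective m.primeFactorsList (Nat.cast : Nat → Int)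
          (fun a b hab => by exact_mod_cast hab) p,
        Nat.primeFactorsList_count_eq]
    have hmemxs : ∀ p : Nat, ((p : Int) ∈ factorize (m : Int) ↔ m.factorization p ≠ 0) := by
      intro p
      rw [hxs_eq]
      constructor
      · intro hp
        obtain ⟨q, hq, hqe⟩ := List.mem_map.mp hp
        have hqp : q = p := by exact_mod_cast hqe
        subst hqp
        rw [← Nat.primeFactorsList_count_eq]
        have := List.count_pos_iff.mpr hq
        omega
      · intro hp
        refine List.mem_map.mpr ⟨p, ?_, rfl⟩
        rw [← Nat.primeFactorsList_count_eq] at hp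
        exact List.count_pos_iff.mp (by omega)
    have hxpos : ∀ k ∈ factorize (m : Int), 0 ≤ k := by
      rw [hxs_eq]
      intro k hk
      obtain ⟨q, _, rfl⟩ := List.mem_map.mp hk
      positivity
    have hval' : ∀ kv ∈ (PySem.Dict.counter (factorize (m : Int))).items,
        (PySem.Dict.counter (factorize (m : Int))).getD kv.1 0 = kv.2 := by
      intro kv hkv
      rw [PySem.Dict.items_counter] at hkv
      obtain ⟨k, hk, rfl⟩ := List.mem_map.mp hkv
      rw [PySem.Dict.getD_counter]
    have hpos' : ∀ kv ∈ (PySem.Dict.counter (factorize (m : Int))).items, 0 ≤ kv.2 := by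
      intro kv hkv
      rw [PySem.Dict.items_counter] at hkv
      obtain ⟨k, hk, rfl⟩ := List.mem_map.mp hkv
      positivity
    obtain ⟨A1, A2, A3⟩ := merge_fold (PySem.Dict.counter (factorize (m : Int))) fc
      (PySem.Dict.counter (factorize (m : Int))).items hval' hpos' hnd
    have hKm : ∀ k, k ∈ (PySem.Dict.counter (factorize (m : Int))).items.map Prod.fst
        ↔ k ∈ factorize (m : Int) := by
      intro k
      rw [PySem.Dict.items_counter, List.map_map]
      simp [Function.comp_def, PySem.Set.mem_ofList]
    have hfl : ∀ p, (Nat.lcm L m).factorization p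
        = max (L.factorization p) (m.factorization p) := by
      intro p
      rw [Nat.factorization_lcm hL (by omega), Finsupp.sup_apply]
    refine ⟨A1, ?_, ?_, ?_⟩
    · intro k hk
      rcases (A2 k).mp hk with hk1 | hk2
      · exact hpos k hk1
      · exact hxpos k ((hKm k).mp hk2)
    · intro p
      rw [A2 ((p : Int)), hKm, hmem p, hmemxs p, hfl p]
      omega
    · intro p
      rw [A3 ((p : Int)), hfl p]
      by_cases hp : (p : Int) ∈ (PySem.Dict.counter (factorize (m : Int))).items.map Prod.fst
      · rw [if_pos hp, hval p, hcnt p, Nat.cast_max]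
      · rw [if_neg hp, hval p]
        have hz : m.factorization p = 0 := by
          by_contra h0
          exact hp ((hKm _).mpr ((hmemxs p).mpr h0))
        rw [hz]
        simp
  · have hfz : factorize n = [] := by
      rw [factorize.eq_def, dif_neg hn]
    rw [if_neg hn, hfz]
    have hitems : (PySem.Dict.counter ([] : List Int)).items = [] := by
      simp [PySem.Dict.items_counter]
    rw [hitems]
    exact ⟨hnd, hpos, hmem, hval⟩

theorem outer_fold (nums : List Int) (fc : PySem.Dict Int Int) (L : Nat)
    (hfc : GoodDict fc L) (hL : L ≠ 0) :
    GoodDict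
      (nums.foldl
        (fun fc number =>
          (PySem.Dict.counter (factorize number)).items.foldl
            (fun fc ic =>
              if fc.contains ic.1 = false then fc.insert ic.1 ic.2
              else if fc.getD ic.1 0 < (PySem.Dict.counter (factorize number)).getD ic.1 0 then fc.insert ic.1 ic.2
              else fc) fc) fc)
      (lcmFoldN nums L) ∧ lcmFoldN nums L ≠ 0 := by
  induction nums generalizing fc L with
  | nil => exact ⟨hfc, by simpa [lcmFoldN] using hL⟩
  | cons x xs ih =>
    rw [List.foldl_cons]
    have h1 := merge_counter fc L x hfc hL
    have hL1 : (if 1 < x then Nat.lcm L x.toNat else L) ≠ 0 := by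
      split_ifs with hx
      · exact Nat.lcm_ne_zero hL (by omega)
      · exact hL
    have h2 := ih _ _ h1 hL1
    simpa [lcmFoldN] using h2

theorem foldl_mul_eq_prod {α : Type} (l : List α) (g : α → Int) (r : Int) :
    l.foldl (fun r x => r * g x) r = r * (l.map g).prod := by
  induction l generalizing r with
  | nil => simp
  | cons x xs ih => simp [ih, mul_assoc]

theorem prod_eq (fc : PySem.Dict Int Int) (L : Nat) (h : GoodDict fc L) (hL : L ≠ 0) :
    fc.items.foldl (fun result ic => result * ic.1 ^ ic.2.toNat) 1 = (L : Int) := by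
  obtain ⟨hnd, hpos, hmem, hval⟩ := h
  rw [PySem.Dict.items_eq_map_keys fc hnd 0, List.foldl_map]
  simp only []
  rw [foldl_mul_eq_prod fc.keys (fun k => k ^ (fc.getD k 0).toNat) 1, one_mul]
  have hkeys : fc.keys = (fc.keys.map Int.toNat).map (fun p : Nat => (p : Int)) := by
    rw [List.map_map]
    have h1 : ∀ k ∈ fc.keys, ((fun p : Nat => (p : Int)) ∘ Int.toNat) k = id k := by
      intro k hk
      have := hpos k hk
      simp only [Function.comp_apply, id_eq]
      omega
    rw [List.map_congr_left h1, List.map_id]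
  rw [hkeys, List.map_map]
  have hfun : ∀ p ∈ fc.keys.map Int.toNat,
      ((fun k => k ^ (fc.getD k 0).toNat) ∘ fun p : Nat => (p : Int)) p
        = ((p ^ L.factorization p : Nat) : Int) := by
    intro p _
    simp only [Function.comp_apply]
    rw [hval p, Int.toNat_natCast]
    push_cast
    rfl
  rw [List.map_congr_left hfun]
  have hsplit : List.map (fun p : Nat => ((p ^ L.factorization p : Nat) : Int))
        (List.map Int.toNat fc.keys)
      = (List.map (fun p => p ^ L.factorization p) (List.map Int.toNat fc.keys)).map
        (fun n : Nat => (n : Int)) := by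
    simp [List.map_map, Function.comp_def]
  rw [hsplit, ← Nat.cast_list_prod, Nat.cast_inj]
  have hKnd : (fc.keys.map Int.toNat).Nodup := by
    refine List.Nodup.map_on ?_ hnd
    intro x hx y hy hxy
    have := hpos x hx
    have := hpos y hy
    omega
  have hKfin : (fc.keys.map Int.toNat).toFinset = L.factorization.support := by
    ext p
    simp only [List.mem_toFinset, Finsupp.mem_support_iff]
    constructor
    · intro hp
      obtain ⟨k, hk, rfl⟩ := List.mem_map.mp hp
      have hk0 := hpos k hk
      have hkk : ((k.toNat : Nat) : Int) = k := by omega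
      exact (hmem k.toNat).mp (by rwa [hkk])
    · intro hp
      exact List.mem_map.mpr ⟨(p : Int), (hmem p).mpr hp, by simp⟩
  rw [← List.prod_toFinset _ hKnd, hKfin]
  exact Nat.prod_factorization_pow_eq_self hL

-- ===== VERDICT (by name: the statement is the Claim_ definition above) =====
theorem cumulative_biggest_factors_spec : Claim_equal_cumulative_biggest_factors := by
  intro numbers _
  unfold Spec_cumulative_biggest_factors cumulative_biggest_factors cumulative_biggest_factors_alt
  have hmap : numbers.foldl (fun acc number => acc ++ [PySem.Dict.counter (factorize number)]) []
      = numbers.map (fun number => PySem.Dict.counter (factorize number)) := by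
    simpa using PySem.List.foldl_append_singleton_eq_map
      (fun number => PySem.Dict.counter (factorize number)) numbers []
  simp only [hmap, List.foldl_map]
  have hgood : GoodDict PySem.Dict.empty 1 := by
    refine ⟨by simp, by simp, fun p => by simp [Nat.factorization_one], fun p => by
      simp [Nat.factorization_one]⟩
  obtain ⟨hG, hne⟩ := outer_fold numbers PySem.Dict.empty 1 hgood one_ne_zero
  rw [prod_eq _ _ hG hne]
  simpa using (alt_eq_lcmFold numbers 1 one_pos).symm
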